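-- pv_equiv track=rewrite | github.com/henry753951/Encryption | Algorithms/StrangeShapeAlgorithm.py | PutTextEn
-- ===== SOURCE A (Python) =====
-- def PutTextEn(Nowmap, text):
--     index=0
--     for col_index in range(len(Nowmap[0])):
--         for row in Nowmap:
--             if index > len(text):
--                 break
--             if row[col_index] == '&':
--                 row[col_index]=text[index]
--                 index+=1
--     return Nowmap
-- ===== SOURCE B (Python) =====
-- def PutTextEn(Nowmap, text):
--     width = len(Nowmap[0])
--     positions = [(r, col) for col in range(width)
--                  for r in range(len(Nowmap)) if Nowmap[r][col] == '&']
--     for (r, col), ch in zip(positions, text):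
--         Nowmap[r][col] = ch
--     return Nowmap
-- ===== Notes on version B (the rewrite author's own statement) =====
-- stated objective: alternative
-- what changed: A interleaves scanning and writing in one nested column-major loop with a running text index and a break; B first collects the list of '&'-cell coordinates in column-major order, then zips it with the text and assigns in a single separate pass.
import Mathlib
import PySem

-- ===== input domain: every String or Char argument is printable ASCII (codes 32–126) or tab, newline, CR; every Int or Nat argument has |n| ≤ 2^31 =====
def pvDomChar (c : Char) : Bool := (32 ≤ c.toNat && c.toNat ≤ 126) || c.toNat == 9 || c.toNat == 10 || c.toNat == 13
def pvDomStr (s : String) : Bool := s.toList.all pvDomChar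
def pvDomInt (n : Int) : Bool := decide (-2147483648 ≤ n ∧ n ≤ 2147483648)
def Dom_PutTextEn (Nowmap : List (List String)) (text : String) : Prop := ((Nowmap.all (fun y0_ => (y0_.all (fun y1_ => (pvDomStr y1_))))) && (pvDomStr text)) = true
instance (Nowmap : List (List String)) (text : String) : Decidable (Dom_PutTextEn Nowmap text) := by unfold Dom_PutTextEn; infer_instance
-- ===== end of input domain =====

-- B replaces A's interleaved scan-and-write nested loop (running text index + break) by a
-- two-phase decomposition: collect the '&'-cell coordinates column-major, then zip-assign.
-- Both Pythons mutate Nowmap in place and return it; the equivalence proved here is about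
-- the return value.

-- ===== PORT A =====
-- Inner `for row in Nowmap` loop, rendered as a fold over row indices updating the map
-- (Python mutates the row objects in place).  Python's `break` fires when index > len(text)
-- and index never changes afterwards in that column, so it is rendered as a no-op guard:
-- once the condition holds every remaining iteration leaves the state unchanged.
def pvInnerA (chars : List String) (col : Nat) (rs : List Nat)
    (st : List (List String) × Nat) : List (List String) × Nat :=
  rs.foldl (fun st' r =>
    if st'.2 > chars.length then st'
    else if (st'.1.getD r []).getD col "" = "&" then
      (st'.1.set r ((st'.1.getD r []).set col (chars.getD st'.2 "")), st'.2 + 1)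
    else st') st

def pvStepA (chars : List String) (st : List (List String) × Nat) (col : Nat) :
    List (List String) × Nat :=
  pvInnerA chars col (List.range st.1.length) st

-- text[index] is a one-character string, hence chars = the characters of text as strings.
def PutTextEn (Nowmap : List (List String)) (text : String) : List (List String) :=
  ((List.range (Nowmap.headD []).length).foldl
      (pvStepA (text.toList.map (fun c => String.mk [c]))) (Nowmap, 0)).1

-- ===== PORT B =====
-- B-side helpers: coordinates of '&' cells of one column, of the first `c` columns
-- (column-major), and one assignment `Nowmap[r][col] = ch`.
def pvPosCol (Nowmap : List (List String)) (col : Nat) : List (Nat × Nat) :=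
  (List.range Nowmap.length).filterMap (fun r =>
    if (Nowmap.getD r []).getD col "" = "&" then some (r, col) else none)

def pvP (Nowmap : List (List String)) (c : Nat) : List (Nat × Nat) :=
  (List.range c).flatMap (pvPosCol Nowmap)

def pvAssign (m : List (List String)) (pc : (Nat × Nat) × String) : List (List String) :=
  m.set pc.1.1 ((m.getD pc.1.1 []).set pc.1.2 pc.2)

def PutTextEn_alt (Nowmap : List (List String)) (text : String) : List (List String) :=
  ((pvP Nowmap (Nowmap.headD []).length).zip
      (text.toList.map (fun c => String.mk [c]))).foldl pvAssign Nowmap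

-- ===== PRECONDITION & SPEC =====
-- number of '&' cells A visits: per column of the first row, count the rows whose cell there is '&'
def ampTotal (Nowmap : List (List String)) : Nat :=
  ((List.range (Nowmap.headD []).length).map
    (fun col => Nowmap.countP (fun row => decide (row.getD col "" = "&")))).sum

-- Pre_ excludes exactly the inputs on which Python A raises: an empty grid (Nowmap[0] is an
-- IndexError), a row shorter than row 0 (row[col_index] IndexError), and more '&' cells than
-- text characters (A's break condition is `index > len(text)`, so text[len(text)] IndexError).
def Pre_PutTextEn (Nowmap : List (List String)) (text : String) : Prop :=
  Nowmap ≠ [] ∧ (∀ row ∈ Nowmap, (Nowmap.headD []).length ≤ row.length) ∧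
    ampTotal Nowmap ≤ text.length
instance (Nowmap : List (List String)) (text : String) : Decidable (Pre_PutTextEn Nowmap text) := by
  unfold Pre_PutTextEn; infer_instance

def pvWitness_PutTextEn : List (List String) × String := ([["&", "x"], ["y", "&"]], "ab")

def Spec_PutTextEn (Nowmap : List (List String)) (text : String) (out : List (List String)) : Prop := out = PutTextEn_alt Nowmap text
instance (Nowmap : List (List String)) (text : String) (out : List (List String)) : Decidable (Spec_PutTextEn Nowmap text out) := by unfold Spec_PutTextEn; infer_instance

-- ===== CLAIM (what is proved, stated in full; the proofs are below) =====
def Claim_equal_PutTextEn : Prop := ∀ (Nowmap : List (List String)) (text : String), Dom_PutTextEn Nowmap text → Pre_PutTextEn Nowmap text → Spec_PutTextEn Nowmap text (PutTextEn Nowmap text)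

-- ===== LEMMAS AND PROOFS =====

lemma pv_getD_set_ne {α : Type} (l : List α) (i j : Nat) (a d : α) (h : i ≠ j) :
    (l.set i a).getD j d = l.getD j d := by
  simp [List.getD, List.getElem?_set_ne h]

lemma pv_zip_append_drop {α β : Type} (l1 l2 : List α) (cs : List β) :
    (l1 ++ l2).zip cs = l1.zip cs ++ l2.zip (cs.drop l1.length) := by
  induction l1 generalizing cs with
  | nil => simp
  | cons a l1 ih => cases cs with
    | nil => simp
    | cons c cs => simp [List.zip_cons_cons, ih]

lemma pv_length_foldl_assign (ps : List ((Nat × Nat) × String)) :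
    ∀ m, (ps.foldl pvAssign m).length = m.length := by
  induction ps with
  | nil => intro m; rfl
  | cons p ps ih => intro m; simp [List.foldl_cons, ih, pvAssign]

lemma pv_getD_col_assign (m : List (List String)) (pc : (Nat × Nat) × String) (c r : Nat)
    (hc : pc.1.2 ≠ c) :
    ((pvAssign m pc).getD r []).getD c "" = (m.getD r []).getD c "" := by
  unfold pvAssign
  by_cases hr : pc.1.1 = r
  · subst hr
    by_cases hlt : pc.1.1 < m.length
    · rw [show (m.set pc.1.1 ((m.getD pc.1.1 []).set pc.1.2 pc.2)).getD pc.1.1 []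
            = (m.getD pc.1.1 []).set pc.1.2 pc.2 by
          simp [List.getD, List.getElem?_set_self hlt]]
      exact pv_getD_set_ne _ _ _ _ _ hc
    · rw [List.set_eq_of_length_le (by omega)]
  · rw [pv_getD_set_ne _ _ _ _ _ hr]

lemma pv_getD_col_foldl_assign (c : Nat) :
    ∀ (ps : List ((Nat × Nat) × String)) (m : List (List String)),
      (∀ q ∈ ps, q.1.2 ≠ c) →
      ∀ r, ((ps.foldl pvAssign m).getD r []).getD c "" = (m.getD r []).getD c "" := by
  intro ps
  induction ps with
  | nil => intro m _ r; rfl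
  | cons q ps ih =>
    intro m hq r
    rw [List.foldl_cons, ih _ (fun q' hq' => hq q' (List.mem_cons_of_mem _ hq')) r,
      pv_getD_col_assign m q c r (hq q (List.mem_cons_self ..))]

lemma pv_mem_pvP (M : List (List String)) (c : Nat) (q : Nat × Nat) (h : q ∈ pvP M c) :
    q.2 < c ∧ q.1 < M.length := by
  simp only [pvP, pvPosCol, List.mem_flatMap, List.mem_range, List.mem_filterMap] at h
  obtain ⟨col, hcol, r, hr, hq⟩ := h
  split at hq
  · simp only [Option.some.injEq] at hq
    subst hq
    exact ⟨hcol, hr⟩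
  · exact absurd hq (by simp)

-- '&' positions of column `col` among the row indices `rs`, read from map `m`
def pvRowsAmp (m : List (List String)) (col : Nat) (rs : List Nat) : List (Nat × Nat) :=
  rs.filterMap (fun r => if (m.getD r []).getD col "" = "&" then some (r, col) else none)

lemma pv_inner_go (chars : List String) (col : Nat) :
    ∀ (rs : List Nat) (m : List (List String)) (i : Nat), rs.Nodup →
      i + (pvRowsAmp m col rs).length ≤ chars.length →
      pvInnerA chars col rs (m, i)
        = (((pvRowsAmp m col rs).zip (chars.drop i)).foldl pvAssign m,
            i + (pvRowsAmp m col rs).length) := by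
  intro rs
  induction rs with
  | nil => intro m i _ _; simp [pvInnerA, pvRowsAmp]
  | cons r rs ih =>
    intro m i hnd hle
    have hnotmem : r ∉ rs := (List.nodup_cons.mp hnd).1
    have hnd' : rs.Nodup := (List.nodup_cons.mp hnd).2
    by_cases hamp : (m.getD r []).getD col "" = "&"
    · have hcons : pvRowsAmp m col (r :: rs) = (r, col) :: pvRowsAmp m col rs := by
        unfold pvRowsAmp
        rw [List.filterMap_cons, if_pos hamp]
      rw [hcons] at hle ⊢
      have hi : i < chars.length := by
        simp only [List.length_cons] at hle; omega
      set m' := pvAssign m ((r, col), chars.getD i "") with hm'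
      have hstep : pvInnerA chars col (r :: rs) (m, i) = pvInnerA chars col rs (m', i + 1) := by
        unfold pvInnerA
        rw [List.foldl_cons]
        congr 1
        rw [if_neg (show ¬ i > chars.length by omega), if_pos hamp, hm']
        rfl
      have hsame : pvRowsAmp m' col rs = pvRowsAmp m col rs := by
        unfold pvRowsAmp
        apply List.filterMap_congr
        intro r' hr'
        have hne : r ≠ r' := fun h => hnotmem (h ▸ hr')
        simp only [hm', pvAssign, pv_getD_set_ne _ _ _ _ _ hne]
      have hb : i + 1 + (pvRowsAmp m' col rs).length ≤ chars.length := by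
        rw [hsame]
        simp only [List.length_cons] at hle
        omega
      rw [hstep, ih m' (i + 1) hnd' hb, hsame]
      rw [show List.drop i chars = chars[i] :: List.drop (i + 1) chars from
        (List.getElem_cons_drop hi).symm]
      rw [List.zip_cons_cons, List.foldl_cons]
      rw [show pvAssign m ((r, col), chars[i]) = m' from by
        rw [hm', List.getD_eq_getElem chars "" hi]]
      rw [show i + 1 + (pvRowsAmp m col rs).length
            = i + ((pvRowsAmp m col rs).length + 1) from by omega]
      simp only [List.length_cons]
    · have hcons : pvRowsAmp m col (r :: rs) = pvRowsAmp m col rs := by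
        unfold pvRowsAmp
        rw [List.filterMap_cons, if_neg hamp]
      rw [hcons] at hle ⊢
      have hstep : pvInnerA chars col (r :: rs) (m, i) = pvInnerA chars col rs (m, i) := by
        unfold pvInnerA
        rw [List.foldl_cons]
        congr 1
        rw [if_neg (show ¬ i > chars.length by omega), if_neg hamp]
      rw [hstep, ih m i hnd' hle]

lemma pvP_succ (M : List (List String)) (c : Nat) :
    pvP M (c + 1) = pvP M c ++ pvPosCol M c := by
  simp [pvP, List.range_succ]

lemma pvP_length_mono (M : List (List String)) :
    ∀ (k c : Nat), (pvP M c).length ≤ (pvP M (c + k)).length := by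
  intro k
  induction k with
  | zero => intro c; exact Nat.le_refl _
  | succ k ih =>
    intro c
    calc (pvP M c).length ≤ (pvP M (c + k)).length := ih c
    _ ≤ (pvP M (c + k + 1)).length := by rw [pvP_succ]; simp

lemma pv_outer_inv (M : List (List String)) (chars : List String)
    (hlen : (pvP M ((M.headD []).length)).length ≤ chars.length) :
    ∀ c, c ≤ (M.headD []).length →
      (List.range c).foldl (pvStepA chars) (M, 0)
        = (((pvP M c).zip chars).foldl pvAssign M, (pvP M c).length) := by
  intro c
  induction c with
  | zero => intro _; simp [pvP]
  | succ c ih =>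
    intro hc
    have hprev := ih (Nat.le_of_succ_le hc)
    rw [List.range_succ, List.foldl_append, List.foldl_cons, List.foldl_nil, hprev]
    set Bm := ((pvP M c).zip chars).foldl pvAssign M with hBm
    have hBmlen : Bm.length = M.length := pv_length_foldl_assign _ _
    have hcols : ∀ q ∈ (pvP M c).zip chars, q.1.2 ≠ c := by
      intro q hq
      obtain ⟨qp, qs⟩ := q
      have hmem := (List.of_mem_zip hq).1
      exact Nat.ne_of_lt (pv_mem_pvP M c qp hmem).1
    have hagree : ∀ r, ((Bm.getD r []).getD c "") = ((M.getD r []).getD c "") :=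
      pv_getD_col_foldl_assign c _ M hcols
    have hRows : pvRowsAmp Bm c (List.range M.length) = pvPosCol M c := by
      unfold pvRowsAmp pvPosCol
      apply List.filterMap_congr
      intro r _
      rw [hagree r]
    have hbound : (pvP M c).length + (pvRowsAmp Bm c (List.range M.length)).length
        ≤ chars.length := by
      rw [hRows]
      have hmono : (pvP M (c + 1)).length ≤ (pvP M ((M.headD []).length)).length := by
        obtain ⟨k, hk⟩ := Nat.le.dest hc
        rw [← hk]
        exact pvP_length_mono M k (c + 1)
      rw [pvP_succ, List.length_append] at hmono
      omega
    have hstep : pvStepA chars (Bm, (pvP M c).length) c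
        = (((pvPosCol M c).zip (chars.drop (pvP M c).length)).foldl pvAssign Bm,
            (pvP M c).length + (pvPosCol M c).length) := by
      unfold pvStepA
      show pvInnerA chars c (List.range Bm.length) (Bm, (pvP M c).length) = _
      rw [hBmlen,
        pv_inner_go chars c (List.range M.length) Bm (pvP M c).length List.nodup_range hbound,
        hRows]
    rw [hstep, pvP_succ, pv_zip_append_drop, List.foldl_append, List.length_append]

lemma pv_rowsAmp_length (M : List (List String)) (col : Nat) :
    ∀ rs : List Nat,
      (pvRowsAmp M col rs).length
        = rs.countP (fun r => decide ((M.getD r []).getD col "" = "&")) := by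
  intro rs
  induction rs with
  | nil => rfl
  | cons r rs ih =>
    unfold pvRowsAmp at ih ⊢
    by_cases h : (M.getD r []).getD col "" = "&"
    · have h' : (M[r]?.getD ([] : List String))[col]?.getD "" = "&" := h
      rw [List.filterMap_cons, if_pos h, List.length_cons, ih, List.countP_cons]
      simp [h']
    · have h' : ¬ (M[r]?.getD ([] : List String))[col]?.getD "" = "&" := h
      rw [List.filterMap_cons, if_neg h, ih, List.countP_cons]
      simp [h']

lemma pv_map_getD_range {α : Type} (l : List α) (d : α) :
    (List.range l.length).map (fun r => l.getD r d) = l := by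
  apply List.ext_getElem
  · simp
  · intro i h1 h2
    simp [List.getElem?_eq_getElem h2, List.getD]

lemma pv_pvP_length (M : List (List String)) :
    (pvP M ((M.headD []).length)).length = ampTotal M := by
  unfold pvP ampTotal
  rw [List.length_flatMap]
  congr 1
  apply List.map_congr_left
  intro col _
  rw [show pvPosCol M col = pvRowsAmp M col (List.range M.length) from rfl,
    pv_rowsAmp_length M col (List.range M.length)]
  have h := List.countP_map (l := List.range M.length) (f := fun r => M.getD r ([] : List String))
    (p := fun row => decide (row.getD col "" = "&"))
  rw [pv_map_getD_range M []] at h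
  rw [h]
  rfl

-- ===== VERDICT (by name: the statement is the Claim_ definition above) =====
theorem PutTextEn_spec : Claim_equal_PutTextEn := by
  intro M text _ hPre
  unfold Spec_PutTextEn PutTextEn PutTextEn_alt
  have hlen : (pvP M ((M.headD []).length)).length
      ≤ (text.toList.map (fun c => String.mk [c])).length := by
    rw [pv_pvP_length, List.length_map]
    exact hPre.2.2
  rw [pv_outer_inv M _ hlen ((M.headD []).length) (Nat.le_refl _)]
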